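-- pv_equiv track=rewrite | github.com/caiowmp/UFBA | analise-e-projetos-de-algoritmo/Lista 11/lucro.py | analise
-- ===== SOURCE A (Python) =====
-- def analise(lucros,quantidadeDias,custoDia):
--     maximo = 0
--     maximoAtual = 0
--
--     for dia in range(quantidadeDias):
--         lucro = lucros[dia] - custoDia
--         maximoAtual = max(0, maximoAtual + lucro)
--         maximo = max(maximo, maximoAtual)
--
--     return maximo
-- ===== SOURCE B (Python) =====
-- def analise(lucros, quantidadeDias, custoDia):
--     dias = lucros[:max(0, quantidadeDias)]
--     prefixos = []
--     soma = 0
--     for lucro in dias: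
--         soma += lucro - custoDia
--         prefixos.append(soma)
--     maximo = 0
--     minimo = 0
--     for p in prefixos:
--         if p - minimo > maximo:
--             maximo = p - minimo
--         if p < minimo:
--             minimo = p
--     return maximo
-- ===== Notes on version B (the rewrite author's own statement) =====
-- stated objective: alternative
-- what changed: Replaces Kadane's single reset-to-zero loop indexing lucros[dia] over range(quantidadeDias) with two staged passes over a slice: build the prefix-sum list of daily net profits, then scan it with a running minimum prefix (max profit = prefix - min earlier prefix).
import Mathlib
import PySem

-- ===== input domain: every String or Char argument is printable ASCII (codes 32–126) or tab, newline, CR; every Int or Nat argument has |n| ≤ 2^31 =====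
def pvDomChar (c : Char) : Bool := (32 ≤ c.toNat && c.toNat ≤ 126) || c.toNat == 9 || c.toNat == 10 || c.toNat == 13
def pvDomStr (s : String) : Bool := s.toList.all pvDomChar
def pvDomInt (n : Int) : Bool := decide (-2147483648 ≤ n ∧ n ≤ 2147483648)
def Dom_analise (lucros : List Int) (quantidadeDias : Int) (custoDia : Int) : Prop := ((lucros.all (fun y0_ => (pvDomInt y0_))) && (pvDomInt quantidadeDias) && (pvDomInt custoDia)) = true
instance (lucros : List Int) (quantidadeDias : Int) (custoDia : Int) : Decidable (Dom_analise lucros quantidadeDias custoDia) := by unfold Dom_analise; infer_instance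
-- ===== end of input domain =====

-- B replaces Kadane's single reset-to-zero loop with two staged passes (build the
-- prefix-sum list, then scan it with a running minimum prefix); same O(n) cost,
-- a genuinely different decomposition (alternative).


-- ===== PORT A =====
-- Kadane: state (maximo, maximoAtual); lucros[dia] is PySem.List.pyGet? (the getD 0
-- default is unreachable inside Pre_analise, which keeps every index in range).
def analise (lucros : List Int) (quantidadeDias : Int) (custoDia : Int) : Int :=
  ((PySem.List.pyRange 0 quantidadeDias 1).foldl
    (fun (s : Int × Int) dia =>
      let lucro := ((PySem.List.pyGet? lucros dia).getD 0) - custoDia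
      let maximoAtual := max 0 (s.2 + lucro)
      (max s.1 maximoAtual, maximoAtual))
    (0, 0)).1

-- ===== PORT B =====
-- pass 1 of Source B: the prefix-sum list of (lucro - custoDia), accumulator 'soma'
def pvPrefixos (custoDia : Int) : List Int → Int → List Int
  | [], _ => []
  | lucro :: t, soma =>
      let soma' := soma + (lucro - custoDia)
      soma' :: pvPrefixos custoDia t soma'

-- pass 2 of Source B: scan the prefix list keeping (minimo, maximo)
def pvVarredura : List Int → Int → Int → Int
  | [], _, maximo => maximo
  | p :: t, minimo, maximo =>
      let maximo' := if p - minimo > maximo then p - minimo else maximo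
      let minimo' := if p < minimo then p else minimo
      pvVarredura t minimo' maximo'

def analise_alt (lucros : List Int) (quantidadeDias : Int) (custoDia : Int) : Int :=
  pvVarredura
    (pvPrefixos custoDia (PySem.List.slice lucros none (some (max 0 quantidadeDias))) 0)
    0 0

-- ===== PRECONDITION & SPEC =====
-- A indexes lucros[dia] for dia in range(quantidadeDias): it raises IndexError when
-- quantidadeDias exceeds the list length; Pre_ excludes exactly those inputs.
def Pre_analise (lucros : List Int) (quantidadeDias : Int) (custoDia : Int) : Prop :=
  quantidadeDias ≤ (lucros.length : Int)
instance (lucros : List Int) (quantidadeDias : Int) (custoDia : Int) : Decidable (Pre_analise lucros quantidadeDias custoDia) := by unfold Pre_analise; infer_instance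

def pvWitness_analise : List Int × Int × Int := ([3, -2, 5, -1], 4, 1)

def Spec_analise (lucros : List Int) (quantidadeDias : Int) (custoDia : Int) (out : Int) : Prop := out = analise_alt lucros quantidadeDias custoDia
instance (lucros : List Int) (quantidadeDias : Int) (custoDia : Int) (out : Int) : Decidable (Spec_analise lucros quantidadeDias custoDia out) := by unfold Spec_analise; infer_instance

-- ===== CLAIM (what is proved, stated in full; the proofs are below) =====
def Claim_equal_analise : Prop := ∀ (lucros : List Int) (quantidadeDias : Int) (custoDia : Int), Dom_analise lucros quantidadeDias custoDia → Pre_analise lucros quantidadeDias custoDia → Spec_analise lucros quantidadeDias custoDia (analise lucros quantidadeDias custoDia)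

-- ===== LEMMAS AND PROOFS =====

-- Bridge invariant between Kadane's state (mx, ma) and B's two passes with prefix
-- accumulator soma and scan state (minimo, mx):
-- ma = soma - minimo, minimo ≤ soma, minimo ≤ 0, 0 ≤ mx.
theorem kadane_eq_varredura (c : Int) :
    ∀ (l : List Int) (mx ma soma minimo : Int),
      ma = soma - minimo → minimo ≤ soma → minimo ≤ 0 → 0 ≤ mx →
      (l.foldl (fun (s : Int × Int) x =>
          let lucro := x - c
          let maximoAtual := max 0 (s.2 + lucro)
          (max s.1 maximoAtual, maximoAtual)) (mx, ma)).1
      = pvVarredura (pvPrefixos c l soma) minimo mx := by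
  intro l
  induction l with
  | nil => intro mx ma soma minimo h1 h2 h3 h4; rfl
  | cons x t ih =>
      intro mx ma soma minimo h1 h2 h3 h4
      simp only [List.foldl, pvPrefixos, pvVarredura]
      have hma : max 0 (ma + (x - c)) = (soma + (x - c)) - (if soma + (x - c) < minimo then soma + (x - c) else minimo) := by
        split <;> omega
      have hmx : max mx (max 0 (ma + (x - c))) = (if (soma + (x - c)) - minimo > mx then (soma + (x - c)) - minimo else mx) := by
        split <;> omega
      rw [hmx]
      exact ih _ _ _ _ hma (by split <;> omega) (by split <;> omega) (by split <;> omega)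

-- ===== VERDICT (by name: the statement is the Claim_ definition above) =====
theorem analise_spec : Claim_equal_analise := by
  intro lucros q c _ hpre
  have hpre' : q ≤ (lucros.length : Int) := hpre
  unfold Spec_analise analise analise_alt
  by_cases hq : q ≤ 0
  · rw [PySem.List.pyRange_one_eq_nil (by omega)]
    have hmax : max 0 q = 0 := by omega
    rw [hmax, PySem.List.slice_to lucros (by omega)]
    simp [pvPrefixos, pvVarredura]
  · have hq' : 0 < q := by omega
    have hmax : max 0 q = q := by omega
    rw [hmax, PySem.List.slice_to lucros (by omega)]
    set xs := lucros.take q.toNat with hxs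
    have hlenN : xs.length = q.toNat := by
      simp [hxs, List.length_take]
      omega
    have hlen : (xs.length : Int) = q := by omega
    have hcongr : (PySem.List.pyRange 0 q 1).foldl
        (fun (s : Int × Int) dia =>
          let lucro := ((PySem.List.pyGet? lucros dia).getD 0) - c
          let maximoAtual := max 0 (s.2 + lucro)
          (max s.1 maximoAtual, maximoAtual)) (0, 0)
      = (PySem.List.pyRange 0 q 1).foldl
        (fun (s : Int × Int) dia =>
          (fun (s : Int × Int) (v : Int) =>
            let lucro := v - c
            let maximoAtual := max 0 (s.2 + lucro)
            (max s.1 maximoAtual, maximoAtual)) s (PySem.List.pyGetD xs dia 0)) (0, 0) := by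
      apply PySem.List.foldl_congr_mem
      intro acc dia hmem
      have hd := (PySem.List.mem_pyRange_one).1 hmem
      have hlt : dia.toNat < xs.length := by omega
      have h1 : PySem.List.pyGetD lucros dia 0 = lucros[dia.toNat]'(by omega) :=
        PySem.List.pyGetD_eq_getElem lucros 0 (by omega) (by omega)
      have h2 : PySem.List.pyGetD xs dia 0 = xs[dia.toNat]'hlt :=
        PySem.List.pyGetD_eq_getElem xs 0 (by omega) (by omega)
      have h3 : xs[dia.toNat]'hlt = lucros[dia.toNat]'(by omega) := by
        simp [hxs]
      simp only [PySem.List.pyGetD] at h1 h2 ⊢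
      rw [h2, h3, ← h1]
    rw [hcongr, ← hlen,
      PySem.List.foldl_pyRange_zero_pyGetD' xs 0
        (fun (s : Int × Int) (v : Int) =>
          let lucro := v - c
          let maximoAtual := max 0 (s.2 + lucro)
          (max s.1 maximoAtual, maximoAtual)) (0, 0)]
    exact kadane_eq_varredura c xs 0 0 0 0 rfl le_rfl le_rfl le_rfl
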